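-- pv_equiv track=rewrite | github.com/nimrodmls/huji-cs-intro | week2/assignment/largest_and_smallest.py | largest_and_smallest
-- ===== SOURCE A (Python) =====
-- def largest_and_smallest(num1, num2, num3):
--     """
--     Finding the minimal number and the maximal number from 3 given numbers
--     """
--     nums = [num1, num2, num3]
--     max_num = nums[0]
--     min_num = nums[0]
--     for current_num in nums:
--         if current_num > max_num:
--             max_num = current_num
--         if current_num < min_num:
--             min_num = current_num
--     return max_num, min_num
-- ===== SOURCE B (Python) =====
-- def largest_and_smallest(num1, num2, num3):
--     """
--     Finding the minimal number and the maximal number from 3 given numbers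
--     """
--     ordered = sorted([num1, num2, num3])
--     return ordered[2], ordered[0]
-- ===== Notes on version B (the rewrite author's own statement) =====
-- stated objective: simpler
-- what changed: Replaced the seed-and-compare scan maintaining running max/min with a single sorted() call, reading the max and min off the ends of the ordered list.
import Mathlib
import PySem

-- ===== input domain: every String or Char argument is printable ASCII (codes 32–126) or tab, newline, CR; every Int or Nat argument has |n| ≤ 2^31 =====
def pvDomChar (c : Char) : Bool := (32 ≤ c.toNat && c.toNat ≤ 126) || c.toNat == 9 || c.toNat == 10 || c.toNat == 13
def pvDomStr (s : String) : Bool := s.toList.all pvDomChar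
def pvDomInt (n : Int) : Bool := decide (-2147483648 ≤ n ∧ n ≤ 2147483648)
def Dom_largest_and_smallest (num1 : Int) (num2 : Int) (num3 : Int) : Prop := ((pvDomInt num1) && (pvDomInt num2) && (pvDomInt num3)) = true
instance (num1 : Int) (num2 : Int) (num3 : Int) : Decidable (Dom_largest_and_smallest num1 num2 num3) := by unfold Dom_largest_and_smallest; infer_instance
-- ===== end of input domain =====

-- ===== PORT A =====
def largest_and_smallest (num1 : Int) (num2 : Int) (num3 : Int) : Int × Int :=
  -- nums = [num1, num2, num3]; max_num = min_num = nums[0]; for current_num in nums: update both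
  let nums : List Int := [num1, num2, num3]
  let init : Int × Int := (nums.headI, nums.headI)
  nums.foldl (fun (st : Int × Int) current_num =>
    let max_num := if current_num > st.1 then current_num else st.1
    let min_num := if current_num < st.2 then current_num else st.2
    (max_num, min_num)) init

-- ===== PORT B =====
-- B: sort the three numbers once, read the extremes off the ends.
-- ordered[2] / ordered[0] are always in range for a 3-element list, so .getD 0 is never taken.
def largest_and_smallest_alt (num1 : Int) (num2 : Int) (num3 : Int) : Int × Int :=
  let ordered := PySem.List.sorted [num1, num2, num3] (fun x => x) false
  ((PySem.List.pyGet? ordered 2).getD 0, (PySem.List.pyGet? ordered 0).getD 0)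

-- ===== PRECONDITION & SPEC =====
def Spec_largest_and_smallest (num1 : Int) (num2 : Int) (num3 : Int) (out : Int × Int) : Prop := out = largest_and_smallest_alt num1 num2 num3
instance (num1 : Int) (num2 : Int) (num3 : Int) (out : Int × Int) : Decidable (Spec_largest_and_smallest num1 num2 num3 out) := by unfold Spec_largest_and_smallest; infer_instance

-- ===== CLAIM (what is proved, stated in full; the proofs are below) =====
def Claim_equal_largest_and_smallest : Prop := ∀ (num1 : Int) (num2 : Int) (num3 : Int), Dom_largest_and_smallest num1 num2 num3 → Spec_largest_and_smallest num1 num2 num3 (largest_and_smallest num1 num2 num3)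

-- ===== LEMMAS AND PROOFS =====

-- ===== VERDICT (by name: the statement is the Claim_ definition above) =====
-- Both programs compute (max, min) of the three numbers: key lemma for each side.

theorem portA_eq (a b c : Int) :
    largest_and_smallest a b c = (max a (max b c), min a (min b c)) := by
  unfold largest_and_smallest
  simp only [List.foldl, List.headI]
  apply Prod.ext <;> simp <;> split_ifs <;> omega

theorem portB_eq (a b c : Int) :
    largest_and_smallest_alt a b c = (max a (max b c), min a (min b c)) := by
  unfold largest_and_smallest_alt
  have hperm := PySem.List.sorted_perm [a, b, c] (fun x => x) false
  have hpw := PySem.List.sorted_pairwise (xs := [a, b, c]) (key := fun x => x)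
  have hlen : (PySem.List.sorted [a, b, c] (fun x => x) false).length = 3 := by
    rw [hperm.length_eq]; rfl
  rcases hs : PySem.List.sorted [a, b, c] (fun x => x) false with _ | ⟨x, _ | ⟨y, _ | ⟨z, rest⟩⟩⟩ <;>
    rw [hs] at hlen <;> simp at hlen
  subst hlen
  rw [hs] at hperm hpw
  simp only [List.pairwise_cons, List.mem_cons, List.not_mem_nil] at hpw
  have hx : x ∈ [a, b, c] := hperm.mem_iff.mp (by simp)
  have hy : y ∈ [a, b, c] := hperm.mem_iff.mp (by simp)
  have hz : z ∈ [a, b, c] := hperm.mem_iff.mp (by simp)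
  have ha : a ∈ [x, y, z] := hperm.symm.mem_iff.mp (by simp)
  have hb : b ∈ [x, y, z] := hperm.symm.mem_iff.mp (by simp)
  have hc : c ∈ [x, y, z] := hperm.symm.mem_iff.mp (by simp)
  simp only [List.mem_cons, List.not_mem_nil, or_false] at hx hy hz ha hb hc
  have h2 : PySem.List.pyGet? [x, y, z] 2 = some z := by
    simp [PySem.List.pyGet?, PySem.List.pyIdx?]
  have h0 : PySem.List.pyGet? [x, y, z] 0 = some x := by
    simp [PySem.List.pyGet?, PySem.List.pyIdx?]
  show ((PySem.List.pyGet? [x, y, z] 2).getD 0, (PySem.List.pyGet? [x, y, z] 0).getD 0) = _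
  rw [h2, h0]
  have hxy : x ≤ y := hpw.1 y (Or.inl rfl)
  have hxz : x ≤ z := hpw.1 z (Or.inr (Or.inl rfl))
  have hyz : y ≤ z := hpw.2.1 z (Or.inl rfl)
  simp only [Option.getD_some, Prod.mk.injEq]
  rcases ha with h₁ | h₁ | h₁ <;> rcases hb with h₂ | h₂ | h₂ <;>
    rcases hc with h₃ | h₃ | h₃ <;> constructor <;> omega

-- ===== VERDICT (by name: the statement is the Claim_ definition above) =====
theorem largest_and_smallest_spec : Claim_equal_largest_and_smallest := by
  intro a b c _
  unfold Spec_largest_and_smallest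
  rw [portA_eq, portB_eq]
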